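-- pv_equiv track=rewrite | github.com/LucasvBerkel/NTMI | test.py | get_frequencies_sequences
-- ===== SOURCE A (Python) =====
-- def get_frequencies_sequences(sentencelist, n):
-- 	sequence_dict = {}
-- 	tag_dict = {}
-- 	for sentence in sentencelist:
-- 		for word_index in range(len(sentence)):
-- 			if word_index >= n-1:
-- 				sequence = ""
-- 				tagSeq = ""
-- 				for offset in range(n):
-- 					if offset == 0:
-- 						split = sentence[word_index].split("/")
-- 						sequence = split[0] + " " + split[1]
-- 						tagSeq = split[1]
-- 					else:
-- 						split = sentence[word_index - offset].split("/")
-- 						tagSeq = split[1] + " " + tagSeq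
-- 				if sequence in sequence_dict:
-- 					sequence_dict[sequence] += 1
-- 				else:
-- 					sequence_dict[sequence] = 1
-- 				if tagSeq in tag_dict:
-- 					tag_dict[tagSeq] += 1
-- 				else:
-- 					tag_dict[tagSeq] = 1
--
-- 	return sequence_dict, tag_dict
-- ===== SOURCE B (Python) =====
-- def get_frequencies_sequences(sentencelist, n):
--     sequence_dict = {}
--     tag_dict = {}
--     for sentence in sentencelist:
--         # split every word of the sentence once, up front
--         splits = [word.split("/") for word in sentence]
--         for i in range(len(splits)):
--             if i >= n - 1:
--                 window = splits[i - n + 1:i + 1]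
--                 # word and tag of the window's last entry; an n < 1 window is empty and keys are empty
--                 seq_key = " ".join(window[-1][:2]) if window else ""
--                 tag_key = " ".join(s[1] for s in window)
--                 sequence_dict[seq_key] = sequence_dict.get(seq_key, 0) + 1
--                 tag_dict[tag_key] = tag_dict.get(tag_key, 0) + 1
--     return sequence_dict, tag_dict
-- ===== Notes on version B (the rewrite author's own statement) =====
-- stated objective: alternative
-- what changed: B splits each word of a sentence exactly once into a table of split lists and builds each n-gram's keys from a slice of the table with joins, instead of A's per-position offset loop that re-splits every word of every window and assembles the tag key by repeated prepending; dict updates use get(k, 0) + 1 instead of a membership branch; Pre_ excludes only inputs where A raises IndexError (a word without '/' in a sentence long enough to be reached by the window loop, for n >= 1).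
import Mathlib
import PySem

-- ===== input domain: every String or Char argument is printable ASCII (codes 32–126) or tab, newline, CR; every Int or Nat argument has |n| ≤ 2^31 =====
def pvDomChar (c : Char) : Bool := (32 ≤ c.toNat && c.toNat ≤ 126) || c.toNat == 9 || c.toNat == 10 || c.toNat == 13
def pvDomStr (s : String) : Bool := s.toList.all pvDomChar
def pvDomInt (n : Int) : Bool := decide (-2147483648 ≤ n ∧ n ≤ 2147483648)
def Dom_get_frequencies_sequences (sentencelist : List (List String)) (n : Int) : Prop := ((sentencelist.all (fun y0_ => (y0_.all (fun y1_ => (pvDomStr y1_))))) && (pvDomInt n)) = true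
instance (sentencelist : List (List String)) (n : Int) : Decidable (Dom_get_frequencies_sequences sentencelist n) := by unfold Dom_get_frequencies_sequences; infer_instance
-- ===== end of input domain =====

-- B splits each word of a sentence once into a table of split lists and builds each n-gram's
-- keys from a slice of the table with joins, instead of A's per-position offset loop that
-- re-splits every word of every window (alternative decomposition).


-- ===== PORT A =====
-- dict bump `if k in d: d[k] += 1 else: d[k] = 1`
def pvBumpA (d : PySem.Dict String Int) (k : String) : PySem.Dict String Int :=
  if d.contains k then d.insert k ((d.get? k).getD 0 + 1) else d.insert k 1

def get_frequencies_sequences (sentencelist : List (List String)) (n : Int) : (List (String × Int)) × (List (String × Int)) :=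
  let dicts :=
    sentencelist.foldl (fun (acc : PySem.Dict String Int × PySem.Dict String Int) sentence =>
      (PySem.List.pyRange 0 (sentence.length : Int) 1).foldl (fun acc word_index =>
        if word_index ≥ n - 1 then
          -- inner offset loop building (sequence, tagSeq); Python raises IndexError where
          -- split[1] is missing, so there pyGetD's default stands in for a value Python
          -- never returns (such inputs are outside Pre_; nothing is claimed about them)
          let st :=
            (PySem.List.pyRange 0 n 1).foldl (fun (p : String × String) offset =>
              if offset == 0 then
                let split := (PySem.Str.split? (PySem.List.pyGetD sentence word_index "") "/").getD []
                (PySem.List.pyGetD split 0 "" ++ " " ++ PySem.List.pyGetD split 1 "",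
                 PySem.List.pyGetD split 1 "")
              else
                let split := (PySem.Str.split? (PySem.List.pyGetD sentence (word_index - offset) "") "/").getD []
                (p.1, PySem.List.pyGetD split 1 "" ++ " " ++ p.2)) ("", "")
          (pvBumpA acc.1 st.1, pvBumpA acc.2 st.2)
        else acc) acc)
      (PySem.Dict.empty, PySem.Dict.empty)
  (dicts.1.items, dicts.2.items)

-- ===== PORT B =====
-- dict bump `d[k] = d.get(k, 0) + 1`
def pvBumpB (d : PySem.Dict String Int) (k : String) : PySem.Dict String Int :=
  d.insert k (d.getD k 0 + 1)

-- `word.split("/")`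
def pvSplitW (w : String) : List String := (PySem.Str.split? w "/").getD []

def get_frequencies_sequences_alt (sentencelist : List (List String)) (n : Int) : (List (String × Int)) × (List (String × Int)) :=
  let dicts :=
    sentencelist.foldl (fun (acc : PySem.Dict String Int × PySem.Dict String Int) sentence =>
      let splits := sentence.map pvSplitW
      (PySem.List.pyRange 0 (splits.length : Int) 1).foldl (fun acc i =>
        if i ≥ n - 1 then
          let window := PySem.List.slice splits (some (i - n + 1)) (some (i + 1))
          -- `" ".join(window[-1][:2]) if window else ""` (window[-1] of a nonempty list is its last entry)
          let seq_key := if window = [] then ""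
            else PySem.Str.join " " (PySem.List.slice (window.getLastD []) none (some 2))
          let tag_key := PySem.Str.join " " (window.map (fun s => PySem.List.pyGetD s 1 ""))
          (pvBumpB acc.1 seq_key, pvBumpB acc.2 tag_key)
        else acc) acc)
      (PySem.Dict.empty, PySem.Dict.empty)
  (dicts.1.items, dicts.2.items)

-- ===== PRECONDITION & SPEC =====
-- Pre_ excludes exactly the inputs on which Python A raises IndexError: for n ≥ 1, some word
-- whose split on "/" has fewer than two parts (no "/" in it) in a sentence long enough to be
-- reached by the window loop.
def Pre_get_frequencies_sequences (sentencelist : List (List String)) (n : Int) : Prop :=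
  1 ≤ n → ∀ s ∈ sentencelist, n ≤ (s.length : Int) → ∀ w ∈ s,
    2 ≤ ((PySem.Str.split? w "/").getD []).length
instance (sentencelist : List (List String)) (n : Int) : Decidable (Pre_get_frequencies_sequences sentencelist n) := by unfold Pre_get_frequencies_sequences; infer_instance

def pvWitness_get_frequencies_sequences : List (List String) × Int :=
  ([["the/D", "cat/N", "sat/V"], ["hi/X"]], 2)

def Spec_get_frequencies_sequences (sentencelist : List (List String)) (n : Int) (out : (List (String × Int)) × (List (String × Int))) : Prop := out = get_frequencies_sequences_alt sentencelist n
instance (sentencelist : List (List String)) (n : Int) (out : (List (String × Int)) × (List (String × Int))) : Decidable (Spec_get_frequencies_sequences sentencelist n out) := by unfold Spec_get_frequencies_sequences; infer_instance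

-- ===== CLAIM (what is proved, stated in full; the proofs are below) =====
def Claim_equal_get_frequencies_sequences : Prop := ∀ (sentencelist : List (List String)) (n : Int), Dom_get_frequencies_sequences sentencelist n → Pre_get_frequencies_sequences sentencelist n → Spec_get_frequencies_sequences sentencelist n (get_frequencies_sequences sentencelist n)

-- ===== LEMMAS AND PROOFS =====

-- the two dict-bump idioms agree
theorem pvBump_eq (d : PySem.Dict String Int) (k : String) : pvBumpA d k = pvBumpB d k := by
  unfold pvBumpA pvBumpB PySem.Dict.getD
  by_cases h : d.contains k
  · simp [h]
  · have hg : d.get? k = none := by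
      rw [PySem.Dict.get?_eq_none_iff_contains]; simpa using h
    simp [h, hg]

theorem pvJoin_nil : PySem.Str.join " " [] = "" := rfl

theorem pvJoin_singleton (t : String) : PySem.Str.join " " [t] = t := by
  apply String.toList_injective
  simp [PySem.Str.toList_join, PySem.Chars.join_singleton]

theorem pvJoin_cons_cons (a b : String) (l : List String) :
    PySem.Str.join " " (a :: b :: l) = a ++ " " ++ PySem.Str.join " " (b :: l) := by
  apply String.toList_injective
  simp [PySem.Str.toList_join, PySem.Chars.join_cons_cons]

-- B's `" ".join(split[:2])` is A's `split[0] + " " + split[1]` on a split with both parts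
theorem pvSeqKey (L : List String) (h : 2 ≤ L.length) :
    PySem.Str.join " " (PySem.List.slice L none (some 2))
      = PySem.List.pyGetD L 0 "" ++ " " ++ PySem.List.pyGetD L 1 "" := by
  match L, h with
  | a :: b :: t, _ =>
    rw [PySem.List.slice_to _ (by norm_num)]
    show PySem.Str.join " " [a, b] = _
    rw [pvJoin_cons_cons, pvJoin_singleton]
    have h0 : PySem.List.pyGetD (a :: b :: t) 0 "" = a := by simp [pysem]
    have h1 : PySem.List.pyGetD (a :: b :: t) 1 "" = b := by simp [pysem]
    rw [h0, h1]

-- the inner offset loop of A, characterised: after range(k) (1 ≤ k ≤ wi+1 ≤ len),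
-- sequence = word/tag key of position wi, tagSeq = " ".join of the tags of window [wi-k+1, wi+1)
theorem pvInner (sentence : List String) (wi : Int) (k : Nat) (hk : 1 ≤ k)
    (hlo : (k : Int) - 1 ≤ wi) (hhi : wi < (sentence.length : Int)) :
    (PySem.List.pyRange 0 (k : Int) 1).foldl (fun (p : String × String) offset =>
        if offset == 0 then
          let split := (PySem.Str.split? (PySem.List.pyGetD sentence wi "") "/").getD []
          (PySem.List.pyGetD split 0 "" ++ " " ++ PySem.List.pyGetD split 1 "",
           PySem.List.pyGetD split 1 "")
        else
          let split := (PySem.Str.split? (PySem.List.pyGetD sentence (wi - offset) "") "/").getD []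
          (p.1, PySem.List.pyGetD split 1 "" ++ " " ++ p.2)) ("", "")
      = (PySem.List.pyGetD (pvSplitW (sentence[wi.toNat]'(by omega))) 0 "" ++ " "
           ++ PySem.List.pyGetD (pvSplitW (sentence[wi.toNat]'(by omega))) 1 "",
         PySem.Str.join " " ((PySem.List.slice (sentence.map pvSplitW) (some (wi - k + 1)) (some (wi + 1))).map
           (fun p => PySem.List.pyGetD p 1 ""))) := by
  induction k with
  | zero => omega
  | succ k ih =>
    by_cases hk1 : k = 0
    · subst hk1
      push_cast
      rw [show PySem.List.pyRange 0 1 1 = [0] from by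
        rw [show (1:Int) = 0 + 1 from by norm_num]; exact PySem.List.pyRange_one_singleton 0]
      have hw0 : (0:Int) ≤ wi := by omega
      have hgd : PySem.List.pyGetD sentence wi "" = sentence[wi.toNat]'(by omega) :=
        PySem.List.pyGetD_eq_getElem sentence "" hw0 hhi
      have hsl : PySem.List.slice (sentence.map pvSplitW) (some (wi - 1 + 1)) (some (wi + 1))
          = [pvSplitW (sentence[wi.toNat]'(by omega))] := by
        rw [show wi - 1 + 1 = wi by ring]
        rw [PySem.List.slice_toNat _ hw0 (by omega)]
        have hts : (wi+1).toNat - wi.toNat = 1 := by omega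
        rw [hts]
        have hlt : wi.toNat < (sentence.map pvSplitW).length := by simp; omega
        rw [List.drop_eq_getElem_cons hlt]
        simp
      rw [hsl]
      simp [hgd, pvSplitW, pvJoin_singleton]
    · have hk' : 1 ≤ k := by omega
      have hlo' : (k : Int) - 1 ≤ wi := by push_cast at hlo ⊢; omega
      have hrng : PySem.List.pyRange 0 ((k:Nat)+1 : Nat) 1
          = PySem.List.pyRange 0 (k : Int) 1 ++ [(k:Int)] := by
        push_cast
        exact PySem.List.pyRange_one_succ_right (by positivity)
      rw [hrng, List.foldl_append]
      rw [ih hk' hlo']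
      have hne : ((k:Int) == 0) = false := by simp; omega
      simp only [List.foldl_cons, List.foldl_nil, hne, if_neg, Bool.false_eq_true, not_false_eq_true]
      have hj : (0:Int) ≤ wi - k := by omega
      have hjl : wi - (k:Int) < (sentence.length : Int) := by omega
      have hgd : PySem.List.pyGetD sentence (wi - (k:Int)) "" = sentence[(wi - (k:Int)).toNat]'(by omega) :=
        PySem.List.pyGetD_eq_getElem sentence "" hj hjl
      have hslice : PySem.List.slice (sentence.map pvSplitW) (some (wi - ((k:Nat)+1:Nat) + 1)) (some (wi + 1))
          = pvSplitW (sentence[(wi - (k:Int)).toNat]'(by omega))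
              :: PySem.List.slice (sentence.map pvSplitW) (some (wi - (k:Int) + 1)) (some (wi + 1)) := by
        rw [show wi - ((k:Nat)+1:Nat) + 1 = wi - (k:Int) by push_cast; ring]
        rw [PySem.List.slice_toNat _ hj (by omega), PySem.List.slice_toNat _ (by omega) (by omega)]
        have hlt : (wi - (k:Int)).toNat < (sentence.map pvSplitW).length := by simp; omega
        rw [List.drop_eq_getElem_cons hlt]
        have h1 : (wi+1).toNat - (wi - (k:Int)).toNat = ((wi+1).toNat - (wi - (k:Int) + 1).toNat) + 1 := by omega
        rw [h1, List.take_succ_cons]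
        have h2 : (wi - (k:Int) + 1).toNat = (wi - (k:Int)).toNat + 1 := by omega
        rw [h2]
        simp
      rw [hslice]
      have hlen : ((PySem.List.slice (sentence.map pvSplitW) (some (wi - (k:Int) + 1)) (some (wi + 1))).map
          (fun p => PySem.List.pyGetD p 1 "")) ≠ [] := by
        rw [PySem.List.slice_toNat _ (by omega) (by omega)]
        simp only [ne_eq, List.map_eq_nil_iff, List.take_eq_nil_iff, List.drop_eq_nil_iff]
        simp
        omega
      obtain ⟨b, l, hbl⟩ := List.exists_cons_of_ne_nil hlen
      simp only [List.map_cons, hbl, pvJoin_cons_cons]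
      rw [hgd]
      simp [pvSplitW]

-- for 1 ≤ n the window at position x is nonempty and its last entry is the table entry at x
theorem pvWindowLast (splits : List (List String)) (n x : Int) (hn : 1 ≤ n)
    (hlo : n - 1 ≤ x) (hhi : x < (splits.length : Int)) :
    PySem.List.slice splits (some (x - n + 1)) (some (x + 1)) ≠ [] ∧
    (PySem.List.slice splits (some (x - n + 1)) (some (x + 1))).getLastD []
      = splits[x.toNat]'(by omega) := by
  rw [PySem.List.slice_toNat _ (by omega) (by omega)]
  have hwl : ((x+1).toNat - (x - n + 1).toNat) = n.toNat := by omega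
  rw [hwl]
  have hlen : (List.take n.toNat (List.drop (x - n + 1).toNat splits)).length = n.toNat := by
    rw [List.length_take, List.length_drop]; omega
  constructor
  · intro h
    rw [h] at hlen
    simp at hlen
    omega
  · rw [List.getLastD_eq_getLast?, List.getLast?_eq_getElem?, hlen]
    have hlt : n.toNat - 1 < (List.take n.toNat (List.drop (x - n + 1).toNat splits)).length := by omega
    rw [List.getElem?_eq_getElem hlt]
    simp only [Option.getD_some]
    rw [List.getElem_take, List.getElem_drop]
    congr 1
    omega

-- the empty window for n ≤ 0
theorem pvWindowNil (splits : List (List String)) (n x : Int) (hn : n ≤ 0) (hx : 0 ≤ x) :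
    PySem.List.slice splits (some (x - n + 1)) (some (x + 1)) = [] := by
  rw [PySem.List.slice_toNat _ (by omega) (by omega)]
  have h : ((x+1).toNat - (x - n + 1).toNat) = 0 := by omega
  rw [h, List.take_zero]

-- per-sentence steps of the two ports agree (under the sentence's split side condition)
theorem pvSentence_eq (n : Int) (sentence : List String)
    (hs : 1 ≤ n → n ≤ (sentence.length : Int) → ∀ w ∈ sentence,
      2 ≤ ((PySem.Str.split? w "/").getD []).length)
    (acc : PySem.Dict String Int × PySem.Dict String Int) :
    (PySem.List.pyRange 0 (sentence.length : Int) 1).foldl (fun acc word_index =>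
        if word_index ≥ n - 1 then
          let st :=
            (PySem.List.pyRange 0 n 1).foldl (fun (p : String × String) offset =>
              if offset == 0 then
                let split := (PySem.Str.split? (PySem.List.pyGetD sentence word_index "") "/").getD []
                (PySem.List.pyGetD split 0 "" ++ " " ++ PySem.List.pyGetD split 1 "",
                 PySem.List.pyGetD split 1 "")
              else
                let split := (PySem.Str.split? (PySem.List.pyGetD sentence (word_index - offset) "") "/").getD []
                (p.1, PySem.List.pyGetD split 1 "" ++ " " ++ p.2)) ("", "")
          (pvBumpA acc.1 st.1, pvBumpA acc.2 st.2)
        else acc) acc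
      = (let splits := sentence.map pvSplitW
         (PySem.List.pyRange 0 (splits.length : Int) 1).foldl (fun acc i =>
           if i ≥ n - 1 then
             let window := PySem.List.slice splits (some (i - n + 1)) (some (i + 1))
             let seq_key := if window = [] then ""
               else PySem.Str.join " " (PySem.List.slice (window.getLastD []) none (some 2))
             let tag_key := PySem.Str.join " " (window.map (fun s => PySem.List.pyGetD s 1 ""))
             (pvBumpB acc.1 seq_key, pvBumpB acc.2 tag_key)
           else acc) acc) := by
  simp only [List.length_map]
  apply PySem.List.foldl_congr_mem
  intro a x hx
  rw [PySem.List.mem_pyRange_one] at hx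
  by_cases hge : x ≥ n - 1
  · rw [if_pos hge, if_pos hge]
    by_cases hn : 1 ≤ n
    · -- a real window
      obtain ⟨hne, hlast⟩ := pvWindowLast (sentence.map pvSplitW) n x hn (by omega) (by simp; omega)
      have hnk : ((n.toNat : Nat) : Int) = n := by omega
      rw [show PySem.List.pyRange 0 n 1 = PySem.List.pyRange 0 (n.toNat : Int) 1 from by rw [hnk]]
      rw [pvInner sentence x n.toNat (by omega) (by omega) (by omega)]
      rw [if_neg hne, hlast]
      have hgE : (sentence.map pvSplitW)[x.toNat]'(by simp; omega)
          = pvSplitW (sentence[x.toNat]'(by omega)) := by rw [List.getElem_map]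
      have hmem : sentence[x.toNat]'(by omega) ∈ sentence := List.getElem_mem (by omega)
      have h2 : 2 ≤ (pvSplitW (sentence[x.toNat]'(by omega))).length := hs hn (by omega) _ hmem
      rw [hgE, pvSeqKey _ h2]
      simp only [hnk]
      simp [pvBump_eq]
    · -- n ≤ 0: the offset loop never runs and the window slice is empty; both keys are ""
      rw [show PySem.List.pyRange 0 n 1 = [] from PySem.List.pyRange_one_eq_nil (by omega)]
      rw [pvWindowNil (sentence.map pvSplitW) n x (by omega) (by omega)]
      simp [pvJoin_nil, pvBump_eq]
  · rw [if_neg hge, if_neg hge]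

-- ===== VERDICT (by name: the statement is the Claim_ definition above) =====
theorem get_frequencies_sequences_spec : Claim_equal_get_frequencies_sequences := by
  intro sentencelist n _ hpre
  unfold Spec_get_frequencies_sequences get_frequencies_sequences get_frequencies_sequences_alt
  rw [PySem.List.foldl_congr_mem sentencelist _ _
    ((PySem.Dict.empty : PySem.Dict String Int), (PySem.Dict.empty : PySem.Dict String Int))
    (fun acc x hx => pvSentence_eq n x (fun hn hlen w hw => hpre hn x hx hlen w hw) acc)]
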